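-- pv_equiv track=rewrite | github.com/jarek-bir/Reconcli | reconcli/wafdetectcli.py | detect_waf_headers
-- ===== SOURCE A (Python) =====
-- COMMON_WAF_SIGNATURES = {
--     "Cloudflare": [
--         "cf-ray",
--         "cf-cache-status",
--         "cloudflare",
--         "__cfduid",
--         "cf-connecting-ip",
--     ],
--     "Akamai": ["akamai-", "aka_", "x-akamai", "akamai-ghost-ip", "x-cache-key"],
--     "Sucuri": ["x-sucuri-id", "x-sucuri-block", "sucuri", "x-sucuri-cache"],
--     "AWS WAF": [
--         "x-amzn-requestid",
--         "x-amz-cf-id",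
--         "x-amzn-trace-id",
--         "x-amzn-errortype",
--     ],
--     "Imperva": [
--         "x-cdn",
--         "incapsula",
--         "x-iinfo",
--         "x-sab-agent",
--         "incap_ses",
--         "visid_incap",
--     ],
--     "F5 BIG-IP": [
--         "x-waf",
--         "x-wa-info",
--         "bigip",
--         "x-f5-",
--         "f5-trace-id",
--         "x-f5-backend",
--     ],
--     "DDoS-Guard": ["ddos-guard", "x-ddos", "server-info"],
--     "StackPath": ["stackpath", "x-sdn-traceid", "x-served-by"],
--     "Barracuda": ["barracuda", "x-barracuda", "barra"],
--     "ModSecurity": ["mod_security", "modsecurity", "x-mod-security"],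
--     "Nginx": ["x-nginx", "nginx"],
--     "Apache": ["x-apache", "apache"],
--     "Fortinet": ["fortigate", "fortiweb", "x-fw-debug"],
--     "Palo Alto": ["x-pan-", "panos"],
--     "Check Point": ["x-checkpoint", "cpx"],
--     "SonicWall": ["sonicwall", "x-sonicwall"],
--     "Arbor Networks": ["arbor", "x-arbor"],
--     "Radware": ["radware", "x-rdwr-"],
--     "Citrix": ["citrix", "netscaler", "x-citrix"],
--     "Juniper": ["juniper", "x-juniper"],
--     "Wallarm": ["wallarm", "x-wallarm"],
--     "Signal Sciences": ["sigsci", "x-sigsci"],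
--     "Edgecast": ["edgecast", "x-ec-"],
--     "KeyCDN": ["keycdn", "x-cache"],
--     "MaxCDN": ["maxcdn", "x-pulled-from"],
--     "Fastly": ["fastly", "x-served-by", "x-cache-hits"],
--     "Varnish": ["varnish", "x-varnish", "via"],
-- }
--
-- def detect_waf_headers(headers):
--     detected = []
--     for waf, sigs in COMMON_WAF_SIGNATURES.items():
--         for sig in sigs:
--             for header in headers:
--                 if (
--                     sig.lower() in header.lower()
--                     or sig.lower() in headers[header].lower()
--                 ):
--                     detected.append(waf)
--                     break
--     return list(set(detected))
-- ===== SOURCE B (Python) =====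
-- # Flat pre-lowered signature index: (signature, waf) pairs, the WAF signature table
-- # flattened in its original order (all signatures are already lowercase).
-- _SIG_INDEX = [
--     ('cf-ray', 'Cloudflare'),
--     ('cf-cache-status', 'Cloudflare'),
--     ('cloudflare', 'Cloudflare'),
--     ('__cfduid', 'Cloudflare'),
--     ('cf-connecting-ip', 'Cloudflare'),
--     ('akamai-', 'Akamai'),
--     ('aka_', 'Akamai'),
--     ('x-akamai', 'Akamai'),
--     ('akamai-ghost-ip', 'Akamai'),
--     ('x-cache-key', 'Akamai'),
--     ('x-sucuri-id', 'Sucuri'),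
--     ('x-sucuri-block', 'Sucuri'),
--     ('sucuri', 'Sucuri'),
--     ('x-sucuri-cache', 'Sucuri'),
--     ('x-amzn-requestid', 'AWS WAF'),
--     ('x-amz-cf-id', 'AWS WAF'),
--     ('x-amzn-trace-id', 'AWS WAF'),
--     ('x-amzn-errortype', 'AWS WAF'),
--     ('x-cdn', 'Imperva'),
--     ('incapsula', 'Imperva'),
--     ('x-iinfo', 'Imperva'),
--     ('x-sab-agent', 'Imperva'),
--     ('incap_ses', 'Imperva'),
--     ('visid_incap', 'Imperva'),
--     ('x-waf', 'F5 BIG-IP'),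
--     ('x-wa-info', 'F5 BIG-IP'),
--     ('bigip', 'F5 BIG-IP'),
--     ('x-f5-', 'F5 BIG-IP'),
--     ('f5-trace-id', 'F5 BIG-IP'),
--     ('x-f5-backend', 'F5 BIG-IP'),
--     ('ddos-guard', 'DDoS-Guard'),
--     ('x-ddos', 'DDoS-Guard'),
--     ('server-info', 'DDoS-Guard'),
--     ('stackpath', 'StackPath'),
--     ('x-sdn-traceid', 'StackPath'),
--     ('x-served-by', 'StackPath'),
--     ('barracuda', 'Barracuda'),
--     ('x-barracuda', 'Barracuda'),
--     ('barra', 'Barracuda'),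
--     ('mod_security', 'ModSecurity'),
--     ('modsecurity', 'ModSecurity'),
--     ('x-mod-security', 'ModSecurity'),
--     ('x-nginx', 'Nginx'),
--     ('nginx', 'Nginx'),
--     ('x-apache', 'Apache'),
--     ('apache', 'Apache'),
--     ('fortigate', 'Fortinet'),
--     ('fortiweb', 'Fortinet'),
--     ('x-fw-debug', 'Fortinet'),
--     ('x-pan-', 'Palo Alto'),
--     ('panos', 'Palo Alto'),
--     ('x-checkpoint', 'Check Point'),
--     ('cpx', 'Check Point'),
--     ('sonicwall', 'SonicWall'),
--     ('x-sonicwall', 'SonicWall'),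
--     ('arbor', 'Arbor Networks'),
--     ('x-arbor', 'Arbor Networks'),
--     ('radware', 'Radware'),
--     ('x-rdwr-', 'Radware'),
--     ('citrix', 'Citrix'),
--     ('netscaler', 'Citrix'),
--     ('x-citrix', 'Citrix'),
--     ('juniper', 'Juniper'),
--     ('x-juniper', 'Juniper'),
--     ('wallarm', 'Wallarm'),
--     ('x-wallarm', 'Wallarm'),
--     ('sigsci', 'Signal Sciences'),
--     ('x-sigsci', 'Signal Sciences'),
--     ('edgecast', 'Edgecast'),
--     ('x-ec-', 'Edgecast'),
--     ('keycdn', 'KeyCDN'),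
--     ('x-cache', 'KeyCDN'),
--     ('maxcdn', 'MaxCDN'),
--     ('x-pulled-from', 'MaxCDN'),
--     ('fastly', 'Fastly'),
--     ('x-served-by', 'Fastly'),
--     ('x-cache-hits', 'Fastly'),
--     ('varnish', 'Varnish'),
--     ('x-varnish', 'Varnish'),
--     ('via', 'Varnish'),
-- ]
--
-- def detect_waf_headers(headers):
--     # One pre-lowered searchable blob; '\n' is safe: no signature contains it.
--     blob = "\n".join(part.lower() for kv in headers.items() for part in kv)
--     detected = [waf for sig, waf in _SIG_INDEX if sig in blob]
--     return list(set(detected))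
-- ===== Notes on version B (the rewrite author's own statement) =====
-- stated objective: faster
-- what changed: B lowers every header name and value once into a single newline-joined blob and runs one linear pass over a flat pre-lowered (signature, waf) index list with a single substring test per entry, replacing A's triple-nested loop that re-lowers and re-scans every header pair for every signature of every WAF.
import Mathlib
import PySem

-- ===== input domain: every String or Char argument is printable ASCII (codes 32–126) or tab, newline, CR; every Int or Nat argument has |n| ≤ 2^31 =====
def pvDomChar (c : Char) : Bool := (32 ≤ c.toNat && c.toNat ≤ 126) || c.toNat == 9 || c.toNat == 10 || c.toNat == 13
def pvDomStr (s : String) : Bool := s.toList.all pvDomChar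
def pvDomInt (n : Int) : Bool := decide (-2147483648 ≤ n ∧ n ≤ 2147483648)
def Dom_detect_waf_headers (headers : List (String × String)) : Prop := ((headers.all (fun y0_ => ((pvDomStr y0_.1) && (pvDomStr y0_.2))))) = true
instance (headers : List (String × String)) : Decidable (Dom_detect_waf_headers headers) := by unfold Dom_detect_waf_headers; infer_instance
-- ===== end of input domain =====

-- B replaces A's triple-nested, per-signature re-lowering header scan by one pre-lowered
-- newline-joined blob searched once per entry of a flat pre-lowered (signature, waf) index
-- (objective: faster; equivalence of RETURN values is proved; Python's list(set(...)) hash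
-- order is modelled as first-occurrence order on both sides).

-- ===== PORT A =====
-- the module constant COMMON_WAF_SIGNATURES used by A
def COMMON_WAF_SIGNATURES : List (String × List String) := [
  ("Cloudflare", ["cf-ray", "cf-cache-status", "cloudflare", "__cfduid", "cf-connecting-ip"]),
  ("Akamai", ["akamai-", "aka_", "x-akamai", "akamai-ghost-ip", "x-cache-key"]),
  ("Sucuri", ["x-sucuri-id", "x-sucuri-block", "sucuri", "x-sucuri-cache"]),
  ("AWS WAF", ["x-amzn-requestid", "x-amz-cf-id", "x-amzn-trace-id", "x-amzn-errortype"]),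
  ("Imperva", ["x-cdn", "incapsula", "x-iinfo", "x-sab-agent", "incap_ses", "visid_incap"]),
  ("F5 BIG-IP", ["x-waf", "x-wa-info", "bigip", "x-f5-", "f5-trace-id", "x-f5-backend"]),
  ("DDoS-Guard", ["ddos-guard", "x-ddos", "server-info"]),
  ("StackPath", ["stackpath", "x-sdn-traceid", "x-served-by"]),
  ("Barracuda", ["barracuda", "x-barracuda", "barra"]),
  ("ModSecurity", ["mod_security", "modsecurity", "x-mod-security"]),
  ("Nginx", ["x-nginx", "nginx"]),
  ("Apache", ["x-apache", "apache"]),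
  ("Fortinet", ["fortigate", "fortiweb", "x-fw-debug"]),
  ("Palo Alto", ["x-pan-", "panos"]),
  ("Check Point", ["x-checkpoint", "cpx"]),
  ("SonicWall", ["sonicwall", "x-sonicwall"]),
  ("Arbor Networks", ["arbor", "x-arbor"]),
  ("Radware", ["radware", "x-rdwr-"]),
  ("Citrix", ["citrix", "netscaler", "x-citrix"]),
  ("Juniper", ["juniper", "x-juniper"]),
  ("Wallarm", ["wallarm", "x-wallarm"]),
  ("Signal Sciences", ["sigsci", "x-sigsci"]),
  ("Edgecast", ["edgecast", "x-ec-"]),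
  ("KeyCDN", ["keycdn", "x-cache"]),
  ("MaxCDN", ["maxcdn", "x-pulled-from"]),
  ("Fastly", ["fastly", "x-served-by", "x-cache-hits"]),
  ("Varnish", ["varnish", "x-varnish", "via"])]

-- 'headers' is a Python dict; 'for header in headers' with 'headers[header]' is iteration
-- over the dict's items (the lookup always hits the current key's value).
def detect_waf_headers (headers : List (String × String)) : List String :=
  let d := PySem.Dict.ofList headers
  let detected := COMMON_WAF_SIGNATURES.foldl (fun det ws =>
    ws.2.foldl (fun det sig =>
      -- 'for header in headers: if …: append(waf); break' appends waf iff some header matches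
      if d.items.any (fun kv =>
          PySem.Str.isIn (PySem.Str.lower sig) (PySem.Str.lower kv.1)
          || PySem.Str.isIn (PySem.Str.lower sig) (PySem.Str.lower kv.2))
      then det ++ [ws.1] else det) det) []
  PySem.Set.ofList detected

-- ===== PORT B =====
-- B's module constant _SIG_INDEX: flat pre-lowered (signature, waf) pairs in table order
def SIG_INDEX : List (String × String) := [
  ("cf-ray", "Cloudflare"),
  ("cf-cache-status", "Cloudflare"),
  ("cloudflare", "Cloudflare"),
  ("__cfduid", "Cloudflare"),
  ("cf-connecting-ip", "Cloudflare"),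
  ("akamai-", "Akamai"),
  ("aka_", "Akamai"),
  ("x-akamai", "Akamai"),
  ("akamai-ghost-ip", "Akamai"),
  ("x-cache-key", "Akamai"),
  ("x-sucuri-id", "Sucuri"),
  ("x-sucuri-block", "Sucuri"),
  ("sucuri", "Sucuri"),
  ("x-sucuri-cache", "Sucuri"),
  ("x-amzn-requestid", "AWS WAF"),
  ("x-amz-cf-id", "AWS WAF"),
  ("x-amzn-trace-id", "AWS WAF"),
  ("x-amzn-errortype", "AWS WAF"),
  ("x-cdn", "Imperva"),
  ("incapsula", "Imperva"),
  ("x-iinfo", "Imperva"),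
  ("x-sab-agent", "Imperva"),
  ("incap_ses", "Imperva"),
  ("visid_incap", "Imperva"),
  ("x-waf", "F5 BIG-IP"),
  ("x-wa-info", "F5 BIG-IP"),
  ("bigip", "F5 BIG-IP"),
  ("x-f5-", "F5 BIG-IP"),
  ("f5-trace-id", "F5 BIG-IP"),
  ("x-f5-backend", "F5 BIG-IP"),
  ("ddos-guard", "DDoS-Guard"),
  ("x-ddos", "DDoS-Guard"),
  ("server-info", "DDoS-Guard"),
  ("stackpath", "StackPath"),
  ("x-sdn-traceid", "StackPath"),
  ("x-served-by", "StackPath"),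
  ("barracuda", "Barracuda"),
  ("x-barracuda", "Barracuda"),
  ("barra", "Barracuda"),
  ("mod_security", "ModSecurity"),
  ("modsecurity", "ModSecurity"),
  ("x-mod-security", "ModSecurity"),
  ("x-nginx", "Nginx"),
  ("nginx", "Nginx"),
  ("x-apache", "Apache"),
  ("apache", "Apache"),
  ("fortigate", "Fortinet"),
  ("fortiweb", "Fortinet"),
  ("x-fw-debug", "Fortinet"),
  ("x-pan-", "Palo Alto"),
  ("panos", "Palo Alto"),
  ("x-checkpoint", "Check Point"),
  ("cpx", "Check Point"),
  ("sonicwall", "SonicWall"),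
  ("x-sonicwall", "SonicWall"),
  ("arbor", "Arbor Networks"),
  ("x-arbor", "Arbor Networks"),
  ("radware", "Radware"),
  ("x-rdwr-", "Radware"),
  ("citrix", "Citrix"),
  ("netscaler", "Citrix"),
  ("x-citrix", "Citrix"),
  ("juniper", "Juniper"),
  ("x-juniper", "Juniper"),
  ("wallarm", "Wallarm"),
  ("x-wallarm", "Wallarm"),
  ("sigsci", "Signal Sciences"),
  ("x-sigsci", "Signal Sciences"),
  ("edgecast", "Edgecast"),
  ("x-ec-", "Edgecast"),
  ("keycdn", "KeyCDN"),
  ("x-cache", "KeyCDN"),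
  ("maxcdn", "MaxCDN"),
  ("x-pulled-from", "MaxCDN"),
  ("fastly", "Fastly"),
  ("x-served-by", "Fastly"),
  ("x-cache-hits", "Fastly"),
  ("varnish", "Varnish"),
  ("x-varnish", "Varnish"),
  ("via", "Varnish")]

def detect_waf_headers_alt (headers : List (String × String)) : List String :=
  let d := PySem.Dict.ofList headers
  let blob := PySem.Str.join "\n"
    (d.items.flatMap (fun kv => [PySem.Str.lower kv.1, PySem.Str.lower kv.2]))
  let detected := (SIG_INDEX.filter (fun sw => PySem.Str.isIn sw.1 blob)).map (fun sw => sw.2)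
  PySem.Set.ofList detected

-- ===== PRECONDITION & SPEC =====
def Spec_detect_waf_headers (headers : List (String × String)) (out : List String) : Prop := out = detect_waf_headers_alt headers
instance (headers : List (String × String)) (out : List String) : Decidable (Spec_detect_waf_headers headers out) := by unfold Spec_detect_waf_headers; infer_instance

-- ===== CLAIM (what is proved, stated in full; the proofs are below) =====
def Claim_equal_detect_waf_headers : Prop := ∀ (headers : List (String × String)), Dom_detect_waf_headers headers → Spec_detect_waf_headers headers (detect_waf_headers headers)

-- ===== LEMMAS AND PROOFS =====

-- a needle containing no '\n' is an infix of `a ++ '\n' :: b` iff it is an infix of a part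
theorem infix_append_cons_sep (needle a b : List Char) (hn : '\n' ∉ needle) :
    needle <:+: a ++ '\n' :: b ↔ needle <:+: a ∨ needle <:+: b := by
  constructor
  · rintro ⟨s, t, h⟩
    by_cases hc : s.length + needle.length ≤ a.length
    · left
      have ha : a = (a ++ '\n' :: b).take a.length := by
        simp
      rw [← h] at ha
      rw [List.take_append, List.take_append] at ha
      rw [List.take_of_length_le (by omega), List.take_of_length_le (by omega)] at ha
      exact ⟨s, (List.take (a.length - (s.length + needle.length)) t), by
        simpa [List.append_assoc] using ha.symm⟩
    · by_cases hc2 : a.length + 1 ≤ s.length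
      · right
        have hb : b = (a ++ '\n' :: b).drop (a.length + 1) := by
          simp
        rw [← h, List.append_assoc, List.drop_append_of_le_length (by omega)] at hb
        exact ⟨s.drop (a.length + 1), t, by simpa [List.append_assoc] using hb.symm⟩
      · exfalso
        apply hn
        have hk : a.length - s.length < needle.length := by omega
        have hsle : s.length ≤ a.length := by omega
        have h1 : (s ++ needle ++ t)[a.length]? = (a ++ '\n' :: b)[a.length]? := by rw [h]
        rw [List.getElem?_append_right (le_refl a.length), List.append_assoc,
          List.getElem?_append_right hsle, List.getElem?_append_left hk] at h1
        simp only [Nat.sub_self, List.getElem?_cons_zero] at h1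
        exact List.mem_of_getElem? h1
  · rintro (⟨s, t, h⟩ | ⟨s, t, h⟩)
    · exact ⟨s, t ++ '\n' :: b, by rw [← h]; simp⟩
    · exact ⟨a ++ '\n' :: s, t, by rw [← h]; simp⟩

-- a newline-free nonempty needle is an infix of the '\n'-join iff it is an infix of some part
theorem infix_join_newline (needle : List Char) (h0 : needle ≠ []) (hn : '\n' ∉ needle) :
    ∀ ps : List (List Char),
      needle <:+: PySem.Chars.join ['\n'] ps ↔ ∃ p ∈ ps, needle <:+: p
  | [] => by
      simp [PySem.Chars.join_nil, List.infix_nil, h0]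
  | [p] => by
      simp [PySem.Chars.join_singleton]
  | p :: q :: rest => by
      rw [PySem.Chars.join_cons_cons, List.append_assoc]
      simp only [List.singleton_append]
      rw [infix_append_cons_sep needle p _ hn,
        infix_join_newline needle h0 hn (q :: rest)]
      simp only [List.mem_cons]
      constructor
      · rintro (h | ⟨x, hx, h⟩)
        · exact ⟨p, Or.inl rfl, h⟩
        · exact ⟨x, Or.inr hx, h⟩
      · rintro ⟨x, (rfl | hx), h⟩
        · exact Or.inl h
        · exact Or.inr ⟨x, hx, h⟩

-- bridging: one signature against the blob == one signature against every header pair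
theorem sig_blob_eq (items : List (String × String)) (sig : String)
    (h0 : (PySem.Str.lower sig).toList ≠ []) (hn : '\n' ∉ (PySem.Str.lower sig).toList) :
    PySem.Str.isIn (PySem.Str.lower sig)
      (PySem.Str.join "\n" (items.flatMap (fun kv => [PySem.Str.lower kv.1, PySem.Str.lower kv.2])))
    = items.any (fun kv =>
        PySem.Str.isIn (PySem.Str.lower sig) (PySem.Str.lower kv.1)
        || PySem.Str.isIn (PySem.Str.lower sig) (PySem.Str.lower kv.2)) := by
  rw [Bool.eq_iff_iff, PySem.Str.isIn_iff_infix, PySem.Str.toList_join,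
    show ("\n" : String).toList = ['\n'] from rfl,
    infix_join_newline _ h0 hn, List.any_eq_true]
  simp only [List.map_flatMap, List.mem_flatMap, List.map_cons, List.map_nil, List.mem_cons,
    List.not_mem_nil, or_false, Bool.or_eq_true, PySem.Str.isIn_iff_infix]
  constructor
  · rintro ⟨p, ⟨kv, hkv, rfl | rfl⟩, hinf⟩
    · exact ⟨kv, hkv, Or.inl hinf⟩
    · exact ⟨kv, hkv, Or.inr hinf⟩
  · rintro ⟨kv, hkv, h | h⟩
    · exact ⟨_, ⟨kv, hkv, Or.inl rfl⟩, h⟩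
    · exact ⟨_, ⟨kv, hkv, Or.inr rfl⟩, h⟩

-- B's flat index is A's table flattened; every signature is already lowercase,
-- nonempty and newline-free (checked on the literal tables)
theorem sig_index_eq : SIG_INDEX
    = COMMON_WAF_SIGNATURES.flatMap (fun ws => ws.2.map (fun sig => (sig, ws.1))) := by
  decide

theorem sigs_ok : ∀ ws ∈ COMMON_WAF_SIGNATURES, ∀ sig ∈ ws.2,
    PySem.Str.lower sig = sig ∧ sig.toList ≠ [] ∧ '\n' ∉ sig.toList := by
  decide

-- per-header match predicate (proof-side abbreviation)
def pvMatchA (items : List (String × String)) (sig : String) : Bool :=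
  items.any (fun kv =>
    PySem.Str.isIn (PySem.Str.lower sig) (PySem.Str.lower kv.1)
    || PySem.Str.isIn (PySem.Str.lower sig) (PySem.Str.lower kv.2))

def pvBlob (items : List (String × String)) : String :=
  PySem.Str.join "\n" (items.flatMap (fun kv => [PySem.Str.lower kv.1, PySem.Str.lower kv.2]))

theorem detect_eq (items : List (String × String)) :
    PySem.Set.ofList (COMMON_WAF_SIGNATURES.foldl (fun det ws =>
        ws.2.foldl (fun det sig =>
          if items.any (fun kv =>
              PySem.Str.isIn (PySem.Str.lower sig) (PySem.Str.lower kv.1)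
              || PySem.Str.isIn (PySem.Str.lower sig) (PySem.Str.lower kv.2))
          then det ++ [ws.1] else det) det) [])
    = PySem.Set.ofList
        ((SIG_INDEX.filter (fun sw => PySem.Str.isIn sw.1 (pvBlob items))).map (fun sw => sw.2)) := by
  congr 1
  have hA : COMMON_WAF_SIGNATURES.foldl (fun det ws =>
        ws.2.foldl (fun det sig =>
          if pvMatchA items sig then det ++ [ws.1] else det) det) []
      = COMMON_WAF_SIGNATURES.flatMap (fun ws =>
          (ws.2.filter (pvMatchA items)).map (fun _ => ws.1)) := by
    have h1 : COMMON_WAF_SIGNATURES.foldl (fun det ws =>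
          ws.2.foldl (fun det sig =>
            if pvMatchA items sig then det ++ [ws.1] else det) det) []
        = COMMON_WAF_SIGNATURES.foldl (fun det ws =>
            det ++ (ws.2.filter (pvMatchA items)).map (fun _ => ws.1)) [] := by
      apply PySem.List.foldl_congr_mem
      intro det ws _
      exact PySem.List.foldl_append_if (pvMatchA items) (fun _ => ws.1) ws.2 det
    rw [h1, PySem.List.foldl_append_eq_flatMap]
    simp
  rw [show (fun det ws =>
        ws.2.foldl (fun (det : List String) (sig : String) =>
          if items.any (fun kv =>
              PySem.Str.isIn (PySem.Str.lower sig) (PySem.Str.lower kv.1)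
              || PySem.Str.isIn (PySem.Str.lower sig) (PySem.Str.lower kv.2))
          then det ++ [ws.1] else det) det)
      = (fun det (ws : String × List String) =>
        ws.2.foldl (fun det sig =>
          if pvMatchA items sig then det ++ [ws.1] else det) det) from rfl, hA,
    sig_index_eq, List.filter_flatMap, List.map_flatMap]
  apply List.flatMap_congr
  intro ws hws
  rw [List.filter_map, List.map_map]
  have hfil : ws.2.filter (pvMatchA items)
      = ws.2.filter ((fun sw => PySem.Str.isIn sw.1 (pvBlob items)) ∘ fun sig => (sig, ws.1)) := by
    apply List.filter_congr
    intro sig hsig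
    obtain ⟨hl, h0, hn⟩ := sigs_ok ws hws sig hsig
    show pvMatchA items sig = PySem.Str.isIn sig (pvBlob items)
    rw [show PySem.Str.isIn sig (pvBlob items)
        = PySem.Str.isIn (PySem.Str.lower sig) (pvBlob items) by rw [hl]]
    exact (sig_blob_eq items sig (by rw [hl]; exact h0) (by rw [hl]; exact hn)).symm
  rw [hfil]
  rfl

-- ===== VERDICT (by name: the statement is the Claim_ definition above) =====
theorem detect_waf_headers_spec : Claim_equal_detect_waf_headers := by
  intro headers _
  show detect_waf_headers headers = detect_waf_headers_alt headers
  exact detect_eq (PySem.Dict.ofList headers).items
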